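-- pv_equiv track=rewrite | github.com/susanto-tm/Personal_Projects | Coding_Challenges/problem_2.py | solve
-- ===== SOURCE A (Python) =====
-- def solve(arr):
--     res = []
--
--     for i in range(len(arr)):
--         product = 1
--         for j in range(len(arr)):
--             if arr[j] != arr[i]:
--                 product *= arr[j]
--         res.append(product)
--     return res
-- ===== SOURCE B (Python) =====
-- def solve(arr):
--     # Group by value: counts, then prefix/suffix products over the distinct-value
--     # group products; each element's answer is a dict lookup.  O(n) vs A's O(n^2).
--     counts = {}
--     for x in arr:
--         counts[x] = counts.get(x, 0) + 1
--     keys = list(counts)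
--     powers = [v ** counts[v] for v in keys]
--     k = len(powers)
--     suffix = [1] * (k + 1)
--     for t in range(k - 1, -1, -1):
--         suffix[t] = powers[t] * suffix[t + 1]
--     ans = {}
--     pre = 1
--     for t in range(k):
--         ans[keys[t]] = pre * suffix[t + 1]
--         pre *= powers[t]
--     return [ans[x] for x in arr]
-- ===== Notes on version B (the rewrite author's own statement) =====
-- stated objective: faster
-- what changed: Replaces A's nested all-pairs scan by a single counting pass grouping equal values, prefix/suffix products over the distinct-value group powers, and a dict lookup per element.
import Mathlib
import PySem

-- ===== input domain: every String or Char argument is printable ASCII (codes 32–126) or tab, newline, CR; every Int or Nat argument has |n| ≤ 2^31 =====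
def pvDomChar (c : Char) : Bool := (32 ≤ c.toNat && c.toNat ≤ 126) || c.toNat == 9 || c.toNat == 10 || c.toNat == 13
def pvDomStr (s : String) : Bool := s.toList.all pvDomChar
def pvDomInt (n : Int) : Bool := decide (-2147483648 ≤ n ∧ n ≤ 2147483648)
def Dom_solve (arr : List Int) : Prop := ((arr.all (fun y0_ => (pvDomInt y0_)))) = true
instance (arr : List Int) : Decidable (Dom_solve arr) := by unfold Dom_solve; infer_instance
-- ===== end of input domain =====

-- B replaces A's quadratic double scan by one counting pass over distinct-value groups
-- with prefix/suffix products and a per-element dict lookup (objective: faster, O(n^2) → O(n)).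

-- ===== PORT A =====
def solve (arr : List Int) : List Int :=
  (PySem.List.pyRange 0 (PySem.List.len arr)).foldl (fun res i =>
    res ++ [(PySem.List.pyRange 0 (PySem.List.len arr)).foldl (fun product j =>
      if PySem.List.pyGetD arr j 0 ≠ PySem.List.pyGetD arr i 0
      then product * PySem.List.pyGetD arr j 0 else product) 1]) []

-- ===== PORT B =====
-- suffix array built back-to-front in Source B; here the same values as a right-recursion
def suffList : List Int → List Int
  | [] => [1]
  | p :: ps => (p * (suffList ps).headI) :: suffList ps

-- the 'for t in range(k)' loop of Source B: walks keys/powers/suffix[1:] with accumulator pre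
def buildAns : List Int → List Int → List Int → Int → PySem.Dict Int Int → PySem.Dict Int Int
  | v :: vs, p :: ps, s :: ss, pre, ans => buildAns vs ps ss (pre * p) (ans.insert v (pre * s))
  | _, _, _, _, ans => ans

def solve_alt (arr : List Int) : List Int :=
  let counts := arr.foldl (fun d x => d.insert x (d.getD x 0 + 1)) (PySem.Dict.empty : PySem.Dict Int Int)
  let keys := counts.keys
  let powers := keys.map (fun v => v ^ (counts.getD v 0).toNat)
  let suffix := suffList powers
  let ans := buildAns keys powers suffix.tail 1 PySem.Dict.empty
  arr.map (fun x => ans.getD x 0)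

-- ===== PRECONDITION & SPEC =====
def Spec_solve (arr : List Int) (out : List Int) : Prop := out = solve_alt arr
instance (arr : List Int) (out : List Int) : Decidable (Spec_solve arr out) := by unfold Spec_solve; infer_instance

-- ===== CLAIM (what is proved, stated in full; the proofs are below) =====
def Claim_equal_solve : Prop := ∀ (arr : List Int), Dom_solve arr → Spec_solve arr (solve arr)

-- ===== LEMMAS AND PROOFS =====

-- A computes, at each position, the product of all elements with a different value
lemma foldl_mul_ite (c : Int) (l : List Int) (a : Int) :
    l.foldl (fun p y => if y ≠ c then p * y else p) a = a * (l.filter (fun y => y ≠ c)).prod := by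
  induction l generalizing a with
  | nil => simp
  | cons x xs ih =>
    rw [List.foldl_cons, List.filter_cons]
    by_cases h : x = c
    · rw [if_neg (by simp [h]), if_neg (by simp [h]), ih]
    · rw [if_pos h, if_pos (by simp [h]), ih, List.prod_cons, mul_assoc]

-- reindex a map over positions as a map over the list itself
lemma map_range_getD (l : List Int) (f : Int → Int) :
    (List.range l.length).map (fun k => f (l.getD k 0)) = l.map f := by
  induction l with
  | nil => simp
  | cons x xs ih =>
    rw [List.length_cons, List.range_succ_eq_map]
    simp only [List.map_cons, List.map_map]
    rw [← ih]
    simp [Function.comp]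

lemma solve_eq_map (arr : List Int) :
    solve arr = arr.map (fun x => (arr.filter (fun y => y ≠ x)).prod) := by
  unfold solve
  rw [PySem.List.foldl_append_singleton_eq_map]
  have hlen : PySem.List.len arr = (arr.length : Int) := by simp [PySem.List.len]
  rw [hlen, PySem.List.pyRange_zero_natCast, List.map_map, List.nil_append]
  rw [← map_range_getD arr (fun x => (arr.filter (fun y => y ≠ x)).prod)]
  apply List.map_congr_left
  intro k hk
  simp only [Function.comp]
  rw [← PySem.List.pyRange_zero_natCast, ← hlen]
  rw [PySem.List.foldl_pyRange_pyGetD arr 0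
    (fun product y => if y ≠ PySem.List.pyGetD arr (↑k) 0 then product * y else product) 1 (le_refl 0)]
  rw [Int.toNat_zero, List.drop_zero, foldl_mul_ite]
  simp [PySem.List.pyGetD_natCast]

-- suffList l is l.prod followed by its own tail
lemma suffList_eq_prod_cons (l : List Int) : suffList l = l.prod :: (suffList l).tail := by
  induction l with
  | nil => simp [suffList]
  | cons p ps ih => simp [suffList]; rw [ih]; simp

-- buildAns leaves keys outside its first list untouched
lemma buildAns_getD_not_mem (vs ps ss : List Int) (pre : Int) (ans : PySem.Dict Int Int)
    (v : Int) (hv : v ∉ vs) : (buildAns vs ps ss pre ans).getD v 0 = ans.getD v 0 := by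
  induction vs generalizing ps ss pre ans with
  | nil => cases ps <;> cases ss <;> simp [buildAns]
  | cons u vs' ih =>
    cases ps with
    | nil => simp [buildAns]
    | cons p ps' =>
      cases ss with
      | nil => simp [buildAns]
      | cons s ss' =>
        simp only [buildAns]
        rw [ih _ _ _ _ (by simp at hv; exact hv.2)]
        rw [PySem.Dict.getD_insert]
        simp at hv
        simp [hv.1]

-- the stored answer for each key: pre times the product of the other groups
lemma buildAns_getD (pw : Int → Int) (vs : List Int) (pre : Int) (ans : PySem.Dict Int Int)
    (hnd : vs.Nodup) (v : Int) (hv : v ∈ vs) :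
    (buildAns vs (vs.map pw) (suffList (vs.map pw)).tail pre ans).getD v 0
      = pre * ((vs.filter (fun u => u ≠ v)).map pw).prod := by
  induction vs generalizing pre ans with
  | nil => simp at hv
  | cons u vs' ih =>
    have hnd' : vs'.Nodup := hnd.of_cons
    have hu : u ∉ vs' := (List.nodup_cons.mp hnd).1
    rw [List.map_cons, suffList_eq_prod_cons (pw u :: vs'.map pw)]
    simp only [suffList, List.tail_cons]
    rw [suffList_eq_prod_cons (vs'.map pw)]
    simp only [buildAns]
    rcases List.mem_cons.mp hv with rfl | hv'
    · rw [buildAns_getD_not_mem _ _ _ _ _ _ hu, PySem.Dict.getD_insert]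
      have hfilt : (v :: vs').filter (fun u => decide (u ≠ v)) = vs' := by
        rw [List.filter_cons]
        simp only [decide_not, ne_eq]
        rw [if_neg (by simp), List.filter_eq_self.mpr]
        intro a ha
        simp only [Bool.not_eq_eq_eq_not, Bool.not_true, decide_eq_false_iff_not]
        exact fun h => hu (h ▸ ha)
      rw [hfilt, if_pos rfl]
    · have huv : u ≠ v := fun h => hu (h ▸ hv')
      rw [ih (pre * pw u) _ hnd' hv']
      rw [List.filter_cons, if_pos (by simp [huv])]
      simp [mul_assoc]

-- core: product over l of elements ≠ v = product over a covering nodup list of group powers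
lemma filter_prod_eq (v : Int) : ∀ (d : List Int), d.Nodup → ∀ (l : List Int), (∀ x ∈ l, x ∈ d) →
    (l.filter (fun y => y ≠ v)).prod
      = ((d.filter (fun u => u ≠ v)).map (fun u => u ^ l.count u)).prod := by
  intro d
  induction d with
  | nil =>
    intro _ l hcov
    have : l = [] := List.eq_nil_iff_forall_not_mem.mpr (fun x hx => by simpa using hcov x hx)
    simp [this]
  | cons u d' ih =>
    intro hnd l hcov
    have hnd' : d'.Nodup := hnd.of_cons
    have hu : u ∉ d' := (List.nodup_cons.mp hnd).1
    set l' := l.filter (fun y => y ≠ u) with hl'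
    have hcov' : ∀ x ∈ l', x ∈ d' := by
      intro x hx
      have hxl : x ∈ l := List.mem_of_mem_filter hx
      have hxne : x ≠ u := by simpa using List.of_mem_filter hx
      rcases List.mem_cons.mp (hcov x hxl) with rfl | h
      · exact absurd rfl hxne
      · exact h
    have hcount : ∀ w ∈ d', l'.count w = l.count w := by
      intro w hw
      have hwu : w ≠ u := fun h => hu (h ▸ hw)
      exact List.count_filter (by simpa using hwu)
    by_cases hvu : v = u
    · subst hvu
      rw [List.filter_cons, if_neg (by simp)]
      have hl2 : l'.filter (fun y => y ≠ v) = l' := by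
        rw [hl', List.filter_filter]
        apply List.filter_congr
        intro x _
        by_cases h : x = v <;> simp [h]
      calc (l.filter (fun y => y ≠ v)).prod
          = (l'.filter (fun y => y ≠ v)).prod := by rw [hl2]
        _ = ((d'.filter (fun u' => u' ≠ v)).map (fun u' => u' ^ l'.count u')).prod :=
            ih hnd' l' hcov'
        _ = ((d'.filter (fun u' => u' ≠ v)).map (fun u' => u' ^ l.count u')).prod := by
            apply congrArg
            apply List.map_congr_left
            intro w hw
            rw [hcount w (List.mem_of_mem_filter hw)]
    · have huv : u ≠ v := fun h => hvu h.symm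
      rw [List.filter_cons, if_pos (by simpa using huv)]
      have hperm := List.filter_append_perm (fun y => y = u) (l.filter (fun y => y ≠ v))
      have hprod := hperm.prod_eq
      rw [List.prod_append] at hprod
      have heq1 : (l.filter (fun y => y ≠ v)).filter (fun y => y = u) = l.filter (fun y => y = u) := by
        rw [List.filter_filter]
        apply List.filter_congr
        intro x _
        by_cases h : x = u
        · subst h; simp [huv]
        · simp [h]
      have heq2 : (l.filter (fun y => y ≠ v)).filter (fun y => !decide (y = u))
          = l'.filter (fun y => y ≠ v) := by
        rw [List.filter_filter, hl', List.filter_filter]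
        apply List.filter_congr
        intro x _
        by_cases h : x = u <;> by_cases h' : x = v <;> simp [h, h']
      have hrep : l.filter (fun y => y = u) = List.replicate (l.count u) u := List.filter_beq u
      rw [heq1, heq2, hrep] at hprod
      calc (l.filter (fun y => y ≠ v)).prod
          = (List.replicate (l.count u) u).prod * (l'.filter (fun y => y ≠ v)).prod := by
            rw [← hprod]
        _ = u ^ l.count u * ((d'.filter (fun u' => u' ≠ v)).map (fun u' => u' ^ l'.count u')).prod := by
            rw [List.prod_replicate, ih hnd' l' hcov']
        _ = u ^ l.count u * ((d'.filter (fun u' => u' ≠ v)).map (fun u' => u' ^ l.count u')).prod := by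
            congr 1
            apply congrArg
            apply List.map_congr_left
            intro w hw
            rw [hcount w (List.mem_of_mem_filter hw)]
        _ = ((u :: d'.filter (fun u' => u' ≠ v)).map (fun u' => u' ^ l.count u')).prod := by
            simp


-- ===== VERDICT (by name: the statement is the Claim_ definition above) =====
theorem solve_spec : Claim_equal_solve := by
  intro arr _
  unfold Spec_solve solve_alt
  rw [PySem.Dict.foldl_insert_getD_add_one_eq_counter, solve_eq_map]
  apply List.map_congr_left
  intro x hx
  have hnd : (PySem.Dict.counter arr).keys.Nodup := PySem.Dict.nodup_keys_counter arr
  have hxk : x ∈ (PySem.Dict.counter arr).keys := by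
    rw [PySem.Dict.keys_counter]
    exact (PySem.Set.mem_ofList arr x).mpr hx
  rw [buildAns_getD _ _ _ _ hnd x hxk, one_mul]
  have hcov : ∀ y ∈ arr, y ∈ (PySem.Dict.counter arr).keys := by
    intro y hy
    rw [PySem.Dict.keys_counter]
    exact (PySem.Set.mem_ofList arr y).mpr hy
  rw [filter_prod_eq x _ hnd arr hcov]
  apply congrArg
  apply List.map_congr_left
  intro u hu
  rw [PySem.Dict.getD_counter, Int.toNat_natCast]
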